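-- pv_equiv track=rewrite | github.com/RalucaaMarinela/IA | cv/cv.py | get_bow
-- ===== SOURCE A (Python) =====
-- def get_bow(text, lista_de_cuvinte):
--     '''
--     returneaza BoW corespunzator unui text impartit in cuvinte
--     in functie de lista de cuvinte selectate
--     '''
--     contor = dict()
--     cuvinte = set(lista_de_cuvinte)
--     for cuvant in cuvinte:
--         contor[cuvant] = 0
--     for cuvant in text:
--         if cuvant in cuvinte:
--             contor[cuvant] += 1
--     return contor
-- ===== SOURCE B (Python) =====
-- def get_bow(text, lista_de_cuvinte):
--     # No counting dict at all: for each distinct selected word, scan text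
--     # with list.count. O(|text|*|distinct words|) instead of A's hashed pass.
--     return {cuvant: text.count(cuvant) for cuvant in set(lista_de_cuvinte)}
-- ===== Notes on version B (the rewrite author's own statement) =====
-- stated objective: simpler
-- what changed: B drops the counting dictionary entirely: it maps each distinct selected word to text.count(word), a direct per-word scan of text, instead of A's initialize-keys-then-single-filtered-counting-pass over text.
import Mathlib
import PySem

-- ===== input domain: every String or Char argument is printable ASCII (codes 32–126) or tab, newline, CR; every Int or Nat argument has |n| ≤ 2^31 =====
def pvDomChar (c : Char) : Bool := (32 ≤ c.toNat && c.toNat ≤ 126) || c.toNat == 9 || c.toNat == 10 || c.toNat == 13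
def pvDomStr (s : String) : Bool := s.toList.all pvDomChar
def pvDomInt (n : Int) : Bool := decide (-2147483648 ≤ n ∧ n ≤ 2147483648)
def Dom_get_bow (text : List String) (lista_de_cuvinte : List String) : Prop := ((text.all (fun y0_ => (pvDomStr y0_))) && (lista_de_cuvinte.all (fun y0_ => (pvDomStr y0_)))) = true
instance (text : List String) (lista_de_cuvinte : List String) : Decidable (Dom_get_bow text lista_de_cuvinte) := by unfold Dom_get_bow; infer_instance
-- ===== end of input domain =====

-- B replaces A's dictionary-counting pass by a direct per-word text.count scan over the deduplicated selected-word list (simpler, no counter state; costs O(|text|*|distinct words|)).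


-- ===== PORT A =====
-- A: init a 0-entry for each distinct selected word, then scan text incrementing members.
def get_bow (text : List String) (lista_de_cuvinte : List String) : List (String × Int) :=
  let cuvinte : PySem.Set String := PySem.Set.ofList lista_de_cuvinte
  let contor : PySem.Dict String Int :=
    cuvinte.foldl (fun d cuvant => d.insert cuvant 0) PySem.Dict.empty
  let contor :=
    text.foldl (fun d cuvant =>
      if PySem.Set.contains cuvinte cuvant then d.insert cuvant (d.getD cuvant 0 + 1) else d) contor
  contor.items

-- ===== PORT B =====
-- B: no counter state at all — each distinct selected word is paired with text.count of it.
def get_bow_alt (text : List String) (lista_de_cuvinte : List String) : List (String × Int) :=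
  (PySem.Set.ofList lista_de_cuvinte).map
    (fun cuvant => (cuvant, (PySem.List.count text cuvant : Int)))

-- ===== PRECONDITION & SPEC =====
def Spec_get_bow (text : List String) (lista_de_cuvinte : List String) (out : List (String × Int)) : Prop := out = get_bow_alt text lista_de_cuvinte
instance (text : List String) (lista_de_cuvinte : List String) (out : List (String × Int)) : Decidable (Spec_get_bow text lista_de_cuvinte out) := by unfold Spec_get_bow; infer_instance

-- ===== CLAIM (what is proved, stated in full; the proofs are below) =====
def Claim_equal_get_bow : Prop := ∀ (text : List String) (lista_de_cuvinte : List String), Dom_get_bow text lista_de_cuvinte → Spec_get_bow text lista_de_cuvinte (get_bow text lista_de_cuvinte)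

-- ===== LEMMAS AND PROOFS =====

-- Keys of A's initialisation loop over the deduplicated word list.
theorem keys_init (lista : List String) :
    ((PySem.Set.ofList lista).foldl
        (fun (d : PySem.Dict String Int) c => d.insert c 0) PySem.Dict.empty).keys
      = PySem.Set.ofList lista := by
  rw [PySem.Dict.keys_foldl_insert]
  simp [PySem.Set.update_nil_left, PySem.Set.ofList_ofList]

-- Every value of the initialisation dict reads as 0.
theorem getD_init (cuvinte : List String) (d : PySem.Dict String Int) (w : String)
    (h : d.getD w 0 = 0) :
    (cuvinte.foldl (fun d c => d.insert c (0 : Int)) d).getD w 0 = 0 := by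
  induction cuvinte generalizing d with
  | nil => simpa using h
  | cons c rest ih =>
      simp only [List.foldl_cons]
      apply ih
      rw [PySem.Dict.getD_insert]
      split <;> simp [h]

-- A's counting loop keeps the key set unchanged (it only touches existing keys).
theorem keys_count (text : List String) (cuvinte : PySem.Set String)
    (d : PySem.Dict String Int) (h : d.keys = cuvinte) :
    (text.foldl (fun d c =>
        if PySem.Set.contains cuvinte c then d.insert c (d.getD c 0 + 1) else d) d).keys
      = cuvinte := by
  induction text generalizing d with
  | nil => simpa using h
  | cons x rest ih =>
      simp only [List.foldl_cons]
      by_cases hx : PySem.Set.contains cuvinte x = true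
      · rw [if_pos hx]
        apply ih
        rw [PySem.Dict.keys_insert_of_contains]
        · exact h
        · rw [PySem.Dict.contains_eq_decide_mem_keys, h]
          simpa [PySem.Set.contains_iff] using hx
      · rw [if_neg hx]
        exact ih d h

-- A's counting loop adds text.count w to the stored value of each selected word w.
theorem getD_count (text : List String) (cuvinte : PySem.Set String)
    (d : PySem.Dict String Int) (w : String) (hw : w ∈ cuvinte) :
    (text.foldl (fun d c =>
        if PySem.Set.contains cuvinte c then d.insert c (d.getD c 0 + 1) else d) d).getD w 0
      = d.getD w 0 + text.count w := by
  induction text generalizing d with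
  | nil => simp
  | cons x rest ih =>
      simp only [List.foldl_cons]
      by_cases hx : PySem.Set.contains cuvinte x = true
      · rw [if_pos hx, ih, PySem.Dict.getD_insert]
        by_cases hwx : w = x
        · subst hwx; simp; ring
        · simp [hwx, Ne.symm hwx]
      · have hwx : w ≠ x := by
          intro he; subst he
          exact hx (by simpa [PySem.Set.contains_iff] using hw)
        rw [if_neg hx, ih]
        simp [Ne.symm hwx]

-- ===== VERDICT (by name: the statement is the Claim_ definition above) =====
theorem get_bow_spec : Claim_equal_get_bow := by
  intro text lista _
  show (text.foldl (fun d c =>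
          if PySem.Set.contains (PySem.Set.ofList lista) c then d.insert c (d.getD c 0 + 1) else d)
        ((PySem.Set.ofList lista).foldl
          (fun (d : PySem.Dict String Int) c => d.insert c 0) PySem.Dict.empty)).items
      = (PySem.Set.ofList lista).map
          (fun w => (w, (PySem.List.count text w : Int)))
  have hkeys := keys_count text (PySem.Set.ofList lista) _ (keys_init lista)
  have hnd : (text.foldl (fun d c =>
          if PySem.Set.contains (PySem.Set.ofList lista) c then d.insert c (d.getD c 0 + 1) else d)
        ((PySem.Set.ofList lista).foldl
          (fun (d : PySem.Dict String Int) c => d.insert c 0) PySem.Dict.empty)).keys.Nodup := by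
    rw [hkeys]; exact PySem.Set.nodup_ofList lista
  rw [PySem.Dict.items_eq_map_keys _ hnd 0, hkeys]
  apply List.map_congr_left
  intro w hw
  have h1 : (text.foldl (fun d c =>
          if PySem.Set.contains (PySem.Set.ofList lista) c then d.insert c (d.getD c 0 + 1) else d)
        ((PySem.Set.ofList lista).foldl
          (fun (d : PySem.Dict String Int) c => d.insert c 0) PySem.Dict.empty)).getD w 0
      = (text.count w : Int) := by
    rw [getD_count text (PySem.Set.ofList lista) _ w hw,
        getD_init (PySem.Set.ofList lista) PySem.Dict.empty w (by simp)]
    ring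
  rw [h1, PySem.List.count_eq]
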